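-- pv_equiv track=rewrite | github.com/bartekpacia/matura | zbior/58/zad583.py | znajdz_dni_rekordowe
-- ===== SOURCE A (Python) =====
-- def znajdz_dni_rekordowe(dane: list[int]) -> list[bool]:
--     result: list[bool] = [False] * len(dane)  # True znaczy że jest to Rekordowy Dzień
--
--     max_temp = dane[0]
--     result[0] = True  # zgodnie z treścią zadania, pierwsza wartość też jest rekordem
--     for i in range(len(dane)):
--         temp = dane[i]
--
--         if temp > max_temp:
--             max_temp = temp
--             result[i] = True
--
--     return result
-- ===== SOURCE B (Python) =====
-- def znajdz_dni_rekordowe(dane: list[int]) -> list[bool]: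
--     if not dane:
--         return []
--     prefmax = [dane[0]]
--     for t in dane[1:]:
--         prefmax.append(max(prefmax[-1], t))
--     return [True] + [t > p for t, p in zip(dane[1:], prefmax)]
-- ===== Notes on version B (the rewrite author's own statement) =====
-- stated objective: alternative
-- what changed: B first builds the list of prefix maxima in one pass, then marks records in a second pass by comparing each day with the previous day's prefix maximum, instead of A's single in-place pass that preallocates a boolean array and mutates it while tracking a running max.
-- crash fix: On the empty list A raises IndexError (dane[0]); B returns []. — e.g. on znajdz_dni_rekordowe([]): A raises IndexError, B returns []
import Mathlib
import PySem

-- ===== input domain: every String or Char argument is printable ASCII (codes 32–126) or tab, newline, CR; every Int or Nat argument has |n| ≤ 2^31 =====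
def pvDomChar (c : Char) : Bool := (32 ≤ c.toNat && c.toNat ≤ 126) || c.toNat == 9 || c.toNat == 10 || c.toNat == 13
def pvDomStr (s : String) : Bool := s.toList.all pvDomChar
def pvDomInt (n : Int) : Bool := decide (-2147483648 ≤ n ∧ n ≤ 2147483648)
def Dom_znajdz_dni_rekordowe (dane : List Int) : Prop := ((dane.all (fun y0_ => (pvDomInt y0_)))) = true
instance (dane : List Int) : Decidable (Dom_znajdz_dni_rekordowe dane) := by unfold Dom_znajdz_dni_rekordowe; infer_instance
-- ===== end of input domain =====

-- B replaces A's single mutating pass (preallocated boolean array + running max) by two passes: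
-- build the prefix-maxima list, then mark day i as a record iff dane[i] > prefmax[i-1] (day 0 always).

-- ===== PORT A =====
-- A's loop body: temp = dane[i]; if temp > max_temp: max_temp = temp; result[i] = True
def znajdzStepA (dane : List Int) (s : Int × List Bool) (i : Int) : Int × List Bool :=
  let temp := PySem.List.pyGetD dane i 0
  if temp > s.1 then (temp, PySem.List.pySetD s.2 i true) else s

def znajdz_dni_rekordowe (dane : List Int) : List Bool :=
  match PySem.List.pyGet? dane 0 with
  | none => []  -- dane[0] raises IndexError; excluded by Pre_
  | some maxTemp0 =>
    let result := PySem.List.pySetD (List.replicate dane.length false) 0 true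
    let st := (PySem.List.pyRange 0 dane.length 1).foldl (znajdzStepA dane) (maxTemp0, result)
    st.2

-- ===== PORT B =====
-- prefmax = [dane[0]]; for t in dane[1:]: prefmax.append(max(prefmax[-1], t))
def prefMaxAux (m : Int) : List Int → List Int
  | [] => []
  | t :: ts => max m t :: prefMaxAux (max m t) ts

def znajdz_dni_rekordowe_alt (dane : List Int) : List Bool :=
  match dane with
  | [] => []
  | d0 :: rest =>
    let prefmax := d0 :: prefMaxAux d0 rest
    true :: List.zipWith (fun t p => decide (t > p)) rest prefmax

-- ===== PRECONDITION & SPEC =====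
def Pre_znajdz_dni_rekordowe (dane : List Int) : Prop := dane ≠ []
instance (dane : List Int) : Decidable (Pre_znajdz_dni_rekordowe dane) := by unfold Pre_znajdz_dni_rekordowe; infer_instance
def pvWitness_znajdz_dni_rekordowe : List Int := [3, 1, 4, 4, 5]

-- On the empty list A raises IndexError (dane[0]); B returns [].
def Raises_znajdz_dni_rekordowe (dane : List Int) : Prop := dane = []
instance (dane : List Int) : Decidable (Raises_znajdz_dni_rekordowe dane) := by unfold Raises_znajdz_dni_rekordowe; infer_instance
def pvRaiseWitness_znajdz_dni_rekordowe : List Int := []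
def pvRaiseWitnessOut_znajdz_dni_rekordowe : List Bool := []

def Spec_znajdz_dni_rekordowe (dane : List Int) (out : List Bool) : Prop := out = znajdz_dni_rekordowe_alt dane
instance (dane : List Int) (out : List Bool) : Decidable (Spec_znajdz_dni_rekordowe dane out) := by unfold Spec_znajdz_dni_rekordowe; infer_instance

-- ===== CLAIM (what is proved, stated in full; the proofs are below) =====
def Claim_equal_znajdz_dni_rekordowe : Prop := ∀ (dane : List Int), Dom_znajdz_dni_rekordowe dane → Pre_znajdz_dni_rekordowe dane → Spec_znajdz_dni_rekordowe dane (znajdz_dni_rekordowe dane)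
def Claim_raises_znajdz_dni_rekordowe : Prop := (∀ (dane : List Int), Dom_znajdz_dni_rekordowe dane → Raises_znajdz_dni_rekordowe dane → ¬ Pre_znajdz_dni_rekordowe dane) ∧ (Dom_znajdz_dni_rekordowe (pvRaiseWitness_znajdz_dni_rekordowe) ∧ Raises_znajdz_dni_rekordowe (pvRaiseWitness_znajdz_dni_rekordowe) ∧ znajdz_dni_rekordowe_alt (pvRaiseWitness_znajdz_dni_rekordowe) = pvRaiseWitnessOut_znajdz_dni_rekordowe)

-- ===== LEMMAS AND PROOFS =====

-- the record marks for a tail, given the running maximum so far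
def recMarks (m : Int) : List Int → List Bool
  | [] => []
  | t :: ts => decide (t > m) :: recMarks (max m t) ts

lemma zipWith_prefMax (m : Int) (rest : List Int) :
    List.zipWith (fun t p => decide (t > p)) rest (m :: prefMaxAux m rest) = recMarks m rest := by
  induction rest generalizing m with
  | nil => rfl
  | cons t ts ih => simp [prefMaxAux, recMarks, ih]

lemma foldA_spec (dane : List Int) :
    ∀ (xs : List Int) (pre : List Bool) (m : Int),
      dane.drop pre.length = xs → pre.length + xs.length = dane.length →
      ((PySem.List.pyRange (pre.length : Int) (dane.length : Int) 1).foldl (znajdzStepA dane)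
          (m, pre ++ List.replicate xs.length false)).2
        = pre ++ recMarks m xs := by
  intro xs
  induction xs with
  | nil =>
    intro pre m hdrop hlen
    simp only [List.length_nil] at hlen
    rw [PySem.List.pyRange_one_eq_nil (by omega)]
    simp [recMarks]
  | cons t ts ih =>
    intro pre m hdrop hlen
    simp only [List.length_cons] at hlen
    have hk : pre.length < dane.length := by omega
    have hget : dane.getD pre.length 0 = t := by
      have h1 : dane[pre.length]? = some t := by
        have := congrArg List.head? hdrop
        rwa [List.head?_drop] at this
      simp [List.getD, h1]
    rw [PySem.List.pyRange_one_cons (by omega)]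
    simp only [List.foldl_cons]
    have hrepl : List.replicate (t :: ts).length false
        = false :: List.replicate ts.length false := rfl
    have hset : (pre ++ false :: List.replicate ts.length false).set pre.length true
        = pre ++ true :: List.replicate ts.length false := by
      rw [List.set_append_right _ _ (Nat.le_refl _)]
      simp
    have hstep : znajdzStepA dane (m, pre ++ List.replicate (t :: ts).length false)
          ((pre.length : Nat) : Int)
        = (max m t, pre ++ decide (t > m) :: List.replicate ts.length false) := by
      simp only [znajdzStepA, PySem.List.pyGetD_natCast, PySem.List.pySetD_natCast, hget, hrepl]
      by_cases ht : t > m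
      · rw [if_pos ht, hset]
        simp [max_eq_right (le_of_lt ht), ht]
      · rw [if_neg ht]
        simp only [Prod.mk.injEq]
        constructor
        · omega
        · simp [ht]
    rw [hstep]
    have hmark : (decide (t > m)) :: List.replicate ts.length false
        = [decide (t > m)] ++ List.replicate ts.length false := rfl
    have hpre' : (pre ++ [decide (t > m)]).length = pre.length + 1 := by simp
    have hdrop' : dane.drop (pre ++ [decide (t > m)]).length = ts := by
      rw [hpre']
      have h2 := congrArg (List.drop 1) hdrop
      rw [List.drop_drop] at h2
      simpa using h2
    have push : ((pre.length : Int) + 1) = (((pre ++ [decide (t > m)]).length : Nat) : Int) := by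
      rw [hpre']; push_cast; ring
    rw [hmark, ← List.append_assoc, push,
      ih (pre ++ [decide (t > m)]) (max m t) hdrop' (by simp at hlen ⊢; omega)]
    simp [recMarks]

lemma znajdz_eq (dane : List Int) (h : dane ≠ []) :
    znajdz_dni_rekordowe dane = znajdz_dni_rekordowe_alt dane := by
  obtain ⟨d0, rest, rfl⟩ := List.exists_cons_of_ne_nil h
  have hres : PySem.List.pySetD (List.replicate (d0 :: rest).length false) 0 true
      = [true] ++ List.replicate rest.length false := by
    simp [List.replicate_succ, PySem.List.pySetD_of_nonneg]
  have hcons : PySem.List.pyRange 0 ((d0 :: rest).length : Int) 1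
      = 0 :: PySem.List.pyRange 1 ((d0 :: rest).length : Int) 1 := by
    rw [PySem.List.pyRange_one_cons (by simp)]; norm_num
  have hstep0 : znajdzStepA (d0 :: rest) (d0, [true] ++ List.replicate rest.length false) 0
      = (d0, [true] ++ List.replicate rest.length false) := by
    simp [znajdzStepA, PySem.List.pyGetD_zero_cons]
  have hmain := foldA_spec (d0 :: rest) rest [true] d0 (by simp) (by simp [Nat.add_comm])
  simp only [znajdz_dni_rekordowe, PySem.List.pyGet?_zero_cons, znajdz_dni_rekordowe_alt]
  rw [hres, hcons]
  simp only [List.foldl_cons, hstep0]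
  rw [show (([true] : List Bool).length : Int) = 1 by simp] at hmain
  rw [hmain, zipWith_prefMax]
  rfl

-- ===== VERDICT (by name: the statement is the Claim_ definition above) =====
theorem znajdz_dni_rekordowe_spec : Claim_equal_znajdz_dni_rekordowe := by
  intro dane _ hpre
  exact znajdz_eq dane hpre

@[simp] theorem znajdz_dni_rekordowe_raises : Claim_raises_znajdz_dni_rekordowe := by
  unfold Claim_raises_znajdz_dni_rekordowe
  exact ⟨fun dane _ h hp => hp h, by decide⟩
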